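-- pv_equiv track=rewrite | github.com/sailor777/hw | cards/fool_game.py | trump_robot
-- ===== SOURCE A (Python) =====
-- deck_cards_weighted = [ 'C6','C7','C8','C9','CT','CJ','CQ','CK','CA',
--                         'D6','D7','D8','D9','DT','DJ','DQ','DK','DA',
--                         'H6','H7','H8','H9','HT','HJ','HQ','HK','HA',
--                         'S6','S7','S8','S9','ST','SJ','SQ','SK','SA'
--                         ]
--
-- def trump_robot(cards_robot,trump):
--     trump_robot = 'NO'
--     for card in cards_robot:
--         if card[0] == trump[0]:
--             if trump_robot != 'NO':
--                 if deck_cards_weighted.index(card) \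
--                     < deck_cards_weighted.index(trump_robot):
--                     trump_robot = card
--                 else:
--                     continue
--             else:
--                 trump_robot = card
--     return trump_robot
-- ===== SOURCE B (Python) =====
-- deck_cards_weighted = [ 'C6','C7','C8','C9','CT','CJ','CQ','CK','CA',
--                         'D6','D7','D8','D9','DT','DJ','DQ','DK','DA',
--                         'H6','H7','H8','H9','HT','HJ','HQ','HK','HA',
--                         'S6','S7','S8','S9','ST','SJ','SQ','SK','SA'
--                         ]
--
-- def trump_robot(cards_robot, trump):
--     # collect the robot's trump cards once, then scan the deck in weight
--     # order and return the first deck card the robot holds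
--     held = {card for card in cards_robot if card[0] == trump[0]}
--     for card in deck_cards_weighted:
--         if card in held:
--             return card
--     return 'NO'
-- ===== Notes on version B (the rewrite author's own statement) =====
-- stated objective: alternative
-- what changed: B collects the robot's trump-suited cards into a set in one pass and then scans the fixed 36-card deck in weight order returning the first card held, instead of A's running-minimum scan that calls deck.index twice per trump card.
-- outside the precondition, e.g. on trump_robot(['XZ'], 'X'): A returns 'XZ', B returns 'NO'; on trump_robot(['C6', 'CX'], 'C8'): A raises ValueError, B returns 'C6'
import Mathlib
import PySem

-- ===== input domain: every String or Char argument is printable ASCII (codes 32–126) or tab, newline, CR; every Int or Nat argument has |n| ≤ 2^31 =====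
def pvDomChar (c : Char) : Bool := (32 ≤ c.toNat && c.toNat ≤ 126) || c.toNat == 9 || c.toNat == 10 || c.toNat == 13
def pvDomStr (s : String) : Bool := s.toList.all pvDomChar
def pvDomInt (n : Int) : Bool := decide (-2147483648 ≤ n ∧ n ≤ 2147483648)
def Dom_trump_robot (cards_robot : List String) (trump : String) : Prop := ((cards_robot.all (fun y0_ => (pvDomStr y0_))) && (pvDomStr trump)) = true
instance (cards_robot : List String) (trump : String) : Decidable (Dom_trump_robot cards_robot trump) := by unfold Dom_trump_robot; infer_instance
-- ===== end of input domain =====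

-- B scans the fixed 36-card deck in weight order for a card held by the robot,
-- instead of A's running-minimum scan over the hand (objective: alternative algorithm).

-- ===== PORT A =====
def pvDeck : List String :=
  ["C6","C7","C8","C9","CT","CJ","CQ","CK","CA",
   "D6","D7","D8","D9","DT","DJ","DQ","DK","DA",
   "H6","H7","H8","H9","HT","HJ","HQ","HK","HA",
   "S6","S7","S8","S9","ST","SJ","SQ","SK","SA"]

def pvStepA (trump acc card : String) : String :=
  if PySem.Str.pyGet? card 0 == PySem.Str.pyGet? trump 0 then
    if acc != "NO" then
      match PySem.List.index? pvDeck card, PySem.List.index? pvDeck acc with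
      | some i, some j => if i < j then card else acc
      | _, _ => acc
    else card
  else acc

def trump_robot (cards_robot : List String) (trump : String) : String :=
  cards_robot.foldl (pvStepA trump) "NO"

-- ===== PORT B =====
def trump_robot_alt (cards_robot : List String) (trump : String) : String :=
  let held : PySem.Set String :=
    PySem.Set.ofList (cards_robot.filter
      (fun card => PySem.Str.pyGet? card 0 == PySem.Str.pyGet? trump 0))
  match pvDeck.find? (fun card => PySem.Set.contains held card) with
  | some card => card
  | none => "NO"

-- ===== PRECONDITION & SPEC =====
-- Pre_ excludes inputs on which A raises (an empty-string card or an empty trump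
-- hits IndexError, two trump-suited cards with one outside the 36-card deck hit
-- ValueError in .index) and hands whose ONLY trump-suited card is outside the deck,
-- where A's returning that off-deck card is an accident of .index never being reached.
def Pre_trump_robot (cards_robot : List String) (trump : String) : Prop :=
  (∀ c ∈ cards_robot, c ≠ "") ∧ (cards_robot = [] ∨ trump ≠ "") ∧
  (∀ c ∈ cards_robot, PySem.Str.pyGet? c 0 = PySem.Str.pyGet? trump 0 → c ∈ pvDeck)
instance (cards_robot : List String) (trump : String) : Decidable (Pre_trump_robot cards_robot trump) := by unfold Pre_trump_robot; infer_instance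

def pvWitness_trump_robot : List String × String := (["C7", "S6", "C6"], "C8")

def Spec_trump_robot (cards_robot : List String) (trump : String) (out : String) : Prop := out = trump_robot_alt cards_robot trump
instance (cards_robot : List String) (trump : String) (out : String) : Decidable (Spec_trump_robot cards_robot trump out) := by unfold Spec_trump_robot; infer_instance

-- ===== CLAIM (what is proved, stated in full; the proofs are below) =====
def Claim_equal_trump_robot : Prop := ∀ (cards_robot : List String) (trump : String), Dom_trump_robot cards_robot trump → Pre_trump_robot cards_robot trump → Spec_trump_robot cards_robot trump (trump_robot cards_robot trump)

-- ===== LEMMAS AND PROOFS =====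

-- A's loop body on a suit-matching card (the suit test stripped off).
def pvStep2 (acc card : String) : String :=
  if acc != "NO" then
    match PySem.List.index? pvDeck card, PySem.List.index? pvDeck acc with
    | some i, some j => if i < j then card else acc
    | _, _ => acc
  else card

theorem pvNoNotMem : "NO" ∉ pvDeck := by decide

theorem pvStepA_eq (trump acc card : String) :
    pvStepA trump acc card =
      if PySem.Str.pyGet? card 0 == PySem.Str.pyGet? trump 0 then pvStep2 acc card else acc := rfl

theorem pv_foldl_filter (trump : String) :
    ∀ (cards : List String) (acc : String),
      cards.foldl (pvStepA trump) acc =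
        (cards.filter (fun card => PySem.Str.pyGet? card 0 == PySem.Str.pyGet? trump 0)).foldl pvStep2 acc := by
  intro cards
  induction cards with
  | nil => intro acc; rfl
  | cons c cs ih =>
    intro acc
    by_cases h : PySem.List.pyGet? c.toList 0 = PySem.List.pyGet? trump.toList 0
    · simp [List.foldl_cons, pvStepA_eq, h, ih]
    · simp [List.foldl_cons, pvStepA_eq, h, ih]

theorem pvIdx_some : ∀ (L : List String) (c : String), c ∈ L →
    PySem.List.index? L c = some (L.idxOf c) := by
  intro L
  induction L with
  | nil => intro c hc; cases hc
  | cons a L' ih =>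
    intro c hc
    by_cases h : a = c
    · subst h
      rw [PySem.List.index?_cons_self, List.idxOf_cons_self]
    · have hc' : c ∈ L' := by
        rcases List.mem_cons.mp hc with h' | h'
        · exact absurd h'.symm h
        · exact h'
      rw [PySem.List.index?_cons_of_ne _ h, ih c hc', List.idxOf_cons_ne _ h]
      rfl

theorem pvStep2_deck {acc card : String} (hacc : acc ∈ pvDeck) (hc : card ∈ pvDeck) :
    pvStep2 acc card = if pvDeck.idxOf card < pvDeck.idxOf acc then card else acc := by
  have hne : acc ≠ "NO" := fun h => pvNoNotMem (h ▸ hacc)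
  have hb : (acc != "NO") = true := by simpa using hne
  simp only [pvStep2, hb, if_true, pvIdx_some pvDeck card hc, pvIdx_some pvDeck acc hacc]

-- A-side: the fold from an in-deck accumulator returns an element of acc::m of minimal deck index.
theorem pvFold_spec :
    ∀ (m : List String) (acc : String), acc ∈ pvDeck → (∀ c ∈ m, c ∈ pvDeck) →
      (m.foldl pvStep2 acc = acc ∨ m.foldl pvStep2 acc ∈ m) ∧
      pvDeck.idxOf (m.foldl pvStep2 acc) ≤ pvDeck.idxOf acc ∧
      (∀ c ∈ m, pvDeck.idxOf (m.foldl pvStep2 acc) ≤ pvDeck.idxOf c) := by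
  intro m
  induction m with
  | nil => intro acc _ _; exact ⟨Or.inl rfl, le_refl _, by simp⟩
  | cons b rest ih =>
    intro acc hacc hm
    have hb : b ∈ pvDeck := hm b (by simp)
    have hrest : ∀ c ∈ rest, c ∈ pvDeck := fun c hc => hm c (by simp [hc])
    have hstep : pvStep2 acc b = if pvDeck.idxOf b < pvDeck.idxOf acc then b else acc :=
      pvStep2_deck hacc hb
    have hacc' : pvStep2 acc b ∈ pvDeck := by rw [hstep]; split <;> assumption
    obtain ⟨hmem, hle, hmin⟩ := ih (pvStep2 acc b) hacc' hrest
    have hle' : pvDeck.idxOf (pvStep2 acc b) ≤ pvDeck.idxOf acc ∧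
        pvDeck.idxOf (pvStep2 acc b) ≤ pvDeck.idxOf b := by
      rw [hstep]; split <;> omega
    simp only [List.foldl_cons]
    refine ⟨?_, le_trans hle hle'.1, ?_⟩
    · rcases hmem with h | h
      · rw [h, hstep]; split
        · exact Or.inr (by simp)
        · exact Or.inl rfl
      · exact Or.inr (by simp [h])
    · intro c hc
      rcases List.mem_cons.mp hc with h | h
      · rw [h]; exact le_trans hle hle'.2
      · exact hmin c h

-- find? returns a satisfying element of minimal index among satisfying elements.
theorem pvFind_min {p : String → Bool} :
    ∀ (L : List String) (r : String), L.find? p = some r →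
      ∀ c ∈ L, p c → L.idxOf r ≤ L.idxOf c := by
  intro L
  induction L with
  | nil => intro r h; simp at h
  | cons a L' ih =>
    intro r h c hc hpc
    by_cases hpa : p a = true
    · have hr : r = a := by
        rw [List.find?_cons_of_pos hpa] at h
        exact (Option.some.inj h).symm
      subst hr
      rw [List.idxOf_cons_self]
      exact Nat.zero_le _
    · rw [List.find?_cons_of_neg hpa] at h
      have hra : r ≠ a := by
        intro he; subst he
        rw [List.find?_some h] at hpa; exact hpa rfl
      have hca : c ≠ a := by
        intro he; subst he; exact hpa hpc
      rcases List.mem_cons.mp hc with h' | h'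
      · exact absurd h' hca
      · have := ih r h c h' hpc
        rw [List.idxOf_cons_ne _ (fun he => hra he.symm),
            List.idxOf_cons_ne _ (fun he => hca he.symm)]
        omega

theorem pvB_pred (m : List String) :
    (fun card => PySem.Set.contains (PySem.Set.ofList m) card) = (fun card => decide (card ∈ m)) := by
  funext d
  simp [PySem.Set.contains, PySem.Set.mem_ofList]

-- core equivalence, stated over the already-filtered list of trump-suited cards
theorem pvMain (m : List String) (hmd : ∀ c ∈ m, c ∈ pvDeck) :
    m.foldl pvStep2 "NO" =
      match pvDeck.find? (fun card => decide (card ∈ m)) with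
      | some card => card
      | none => "NO" := by
  cases m with
  | nil => decide
  | cons b rest =>
    have hb : b ∈ pvDeck := hmd b (by simp)
    have hrest : ∀ c ∈ rest, c ∈ pvDeck := fun c hc => hmd c (by simp [hc])
    have hA0 : (b :: rest).foldl pvStep2 "NO" = rest.foldl pvStep2 b := by
      simp [List.foldl_cons, pvStep2]
    obtain ⟨hmemA, hleA, hminA⟩ := pvFold_spec rest b hb hrest
    have hAmem : rest.foldl pvStep2 b ∈ b :: rest := by
      rcases hmemA with h | h
      · simp [h]
      · simp [h]
    have hAmin : ∀ c ∈ b :: rest, pvDeck.idxOf (rest.foldl pvStep2 b) ≤ pvDeck.idxOf c := by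
      intro c hc
      rcases List.mem_cons.mp hc with h | h
      · rw [h]; exact hleA
      · exact hminA c h
    have hex : ∃ x ∈ pvDeck, (decide (x ∈ b :: rest)) = true := ⟨b, hb, by simp⟩
    obtain ⟨rB, hfind⟩ := Option.isSome_iff_exists.mp (List.find?_isSome.mpr hex)
    have hBmem : rB ∈ b :: rest := by
      have := List.find?_some hfind
      simpa using this
    have hBmin : ∀ c ∈ b :: rest, pvDeck.idxOf rB ≤ pvDeck.idxOf c := by
      intro c hc
      exact pvFind_min pvDeck rB hfind c (hmd c hc) (by simpa using hc)
    have heq : rest.foldl pvStep2 b = rB :=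
      (List.idxOf_inj (hmd _ hAmem)).mp
        (le_antisymm (hAmin rB hBmem) (hBmin _ hAmem))
    rw [hA0, hfind]
    exact heq

-- ===== VERDICT (by name: the statement is the Claim_ definition above) =====
theorem trump_robot_spec : Claim_equal_trump_robot := by
  intro cards trump _ hpre
  obtain ⟨_, _, hdeck⟩ := hpre
  unfold Spec_trump_robot trump_robot trump_robot_alt
  rw [pv_foldl_filter]
  simp only [pvB_pred]
  refine pvMain _ ?_
  intro c hc
  have := List.mem_filter.mp hc
  exact hdeck c this.1 (by simpa using this.2)
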